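-- pv_equiv track=rewrite | github.com/threefoldo/allennlp | scripts/adr_util.py | balance_samples
-- ===== SOURCE A (Python) =====
-- def balance_samples(samples):
--     '''
--     balance positive and negative samples
--     '''
--     pos = []
--     neg = []
--     for i, s in enumerate(samples):
--         if s[2] == '0':
--             neg.append(i)
--         else:
--             pos.append(i)
--     pos.extend(neg[:len(pos)])
--     balanced = []
--     for t in pos:
--         balanced.append(samples[t])
--     return balanced
-- ===== SOURCE B (Python) =====
-- def balance_samples(samples):
--     '''
--     balance positive and negative samples
--     '''
--     npos = sum(s[2] != '0' for s in samples)
--     return sorted(samples, key=lambda s: s[2] == '0')[:2 * npos]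
-- ===== Notes on version B (the rewrite author's own statement) =====
-- stated objective: alternative
-- what changed: B keeps no pos/neg lists at all: it counts the positives, stably sorts the samples by the boolean key s[2] == '0' (positives first, original order preserved), and slices off the first 2*npos elements; correct because a stable sort by that key is exactly positives-in-order followed by negatives-in-order, and Python slicing clamps when positives outnumber negatives.
import Mathlib
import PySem

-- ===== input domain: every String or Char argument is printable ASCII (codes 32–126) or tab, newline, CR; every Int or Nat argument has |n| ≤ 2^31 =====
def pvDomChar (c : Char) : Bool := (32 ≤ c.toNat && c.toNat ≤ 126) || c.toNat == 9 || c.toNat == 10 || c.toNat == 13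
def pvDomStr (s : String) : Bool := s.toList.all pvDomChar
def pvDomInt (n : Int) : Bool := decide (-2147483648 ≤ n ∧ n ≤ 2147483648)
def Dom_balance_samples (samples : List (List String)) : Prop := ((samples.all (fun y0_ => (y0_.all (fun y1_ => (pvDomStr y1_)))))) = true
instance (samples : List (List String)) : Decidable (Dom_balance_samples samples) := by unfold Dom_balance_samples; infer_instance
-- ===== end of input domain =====

-- B keeps no pos/neg lists: it counts positives, stably sorts by the boolean key s[2] == '0'
-- (positives first, original order kept by stability) and slices off the first 2*npos elements.

-- ===== PORT A =====
-- A: classify INDICES into pos/neg by s[2], truncate neg, then gather samples[t].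
def balance_samples (samples : List (List String)) : List (List String) :=
  let pn := (PySem.List.enumerate samples 0).foldl
    (fun (pn : List Int × List Int) is =>
      if PySem.List.pyGetD is.2 2 "" == "0" then (pn.1, pn.2 ++ [is.1]) else (pn.1 ++ [is.1], pn.2))
    ([], [])
  let pos := pn.1 ++ PySem.List.slice pn.2 none (some (pn.1.length : Int))
  pos.foldl (fun bal t => bal ++ [PySem.List.pyGetD samples t []]) []

-- ===== PORT B =====
def balance_samples_alt (samples : List (List String)) : List (List String) :=
  let npos : Int := samples.foldl
    (fun (n : Int) s => n + (if !(PySem.List.pyGetD s 2 "" == "0") then 1 else 0)) 0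
  PySem.List.slice
    (PySem.List.sorted samples (fun s => PySem.List.pyGetD s 2 "" == "0") false)
    none (some (2 * npos))

-- ===== PRECONDITION & SPEC =====
-- Pre_ excludes exactly the inputs on which A raises IndexError (a row with fewer than 3 fields).
def Pre_balance_samples (samples : List (List String)) : Prop :=
  ∀ s ∈ samples, 3 ≤ s.length
instance (samples : List (List String)) : Decidable (Pre_balance_samples samples) := by unfold Pre_balance_samples; infer_instance
def pvWitness_balance_samples : List (List String) := [["a", "b", "1"], ["c", "d", "0"]]
def Spec_balance_samples (samples : List (List String)) (out : List (List String)) : Prop := out = balance_samples_alt samples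
instance (samples : List (List String)) (out : List (List String)) : Decidable (Spec_balance_samples samples out) := by unfold Spec_balance_samples; infer_instance

-- ===== CLAIM (what is proved, stated in full; the proofs are below) =====
def Claim_equal_balance_samples : Prop := ∀ (samples : List (List String)), Dom_balance_samples samples → Pre_balance_samples samples → Spec_balance_samples samples (balance_samples samples)

-- ===== LEMMAS AND PROOFS =====

-- A's gather loop is a map
theorem foldl_gather_eq_map (g : Int → List String) (l : List Int) (acc : List (List String)) :
    l.foldl (fun bal t => bal ++ [g t]) acc = acc ++ l.map g := by
  induction l generalizing acc with
  | nil => simp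
  | cons x xs ih => simp [List.foldl, ih]

-- A's index partition, mapped through g, is the element partition by the same test
theorem partition_map (g : Int → List String) :
    ∀ (ps : List (Int × List String)) (pI nI : List Int),
      (∀ p ∈ ps, g p.1 = p.2) →
      (ps.foldl
        (fun (pn : List Int × List Int) is =>
          if PySem.List.pyGetD is.2 2 "" == "0" then (pn.1, pn.2 ++ [is.1]) else (pn.1 ++ [is.1], pn.2))
        (pI, nI)).1.map g =
        (pI.map g) ++ (ps.map (·.2)).filter (fun s => !(PySem.List.pyGetD s 2 "" == "0")) ∧
      (ps.foldl
        (fun (pn : List Int × List Int) is =>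
          if PySem.List.pyGetD is.2 2 "" == "0" then (pn.1, pn.2 ++ [is.1]) else (pn.1 ++ [is.1], pn.2))
        (pI, nI)).2.map g =
        (nI.map g) ++ (ps.map (·.2)).filter (fun s => PySem.List.pyGetD s 2 "" == "0") := by
  intro ps
  induction ps with
  | nil => intro pI nI _; simp
  | cons p ps ih =>
    intro pI nI h
    have hp : g p.1 = p.2 := h p (by simp)
    have hrest : ∀ q ∈ ps, g q.1 = q.2 := fun q hq => h q (by simp [hq])
    by_cases hc : PySem.List.pyGetD p.2 2 "" = "0"
    · simpa [List.foldl, hc, hp] using ih pI (nI ++ [p.1]) hrest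
    · simpa [List.foldl, hc, hp] using ih (pI ++ [p.1]) nI hrest

theorem enumerate_get (samples : List (List String)) :
    ∀ p ∈ PySem.List.enumerate samples 0,
      PySem.List.pyGetD samples p.1 [] = p.2 := by
  intro p hp
  rw [PySem.List.mem_enumerate_iff] at hp
  obtain ⟨k, hk, rfl⟩ := hp
  simp [PySem.List.pyGetD_natCast, List.getD_eq_getElem?_getD, hk]

-- a false-key element is inserted right at the false/true boundary
theorem insertBy_boundary (key : List String → Bool) (x : List String) :
    ∀ (P N : List (List String)), key x = false →
      (∀ p ∈ P, key p = false) → (∀ n ∈ N, key n = true) →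
      PySem.List.insertBy (fun a b => decide (key a < key b)) x (P ++ N) = P ++ x :: N := by
  intro P
  induction P with
  | nil =>
    intro N hx _ hN
    cases N with
    | nil => simp [PySem.List.insertBy]
    | cons n ns =>
      have hn : key n = true := hN n (by simp)
      simp [PySem.List.insertBy, hx, hn]
  | cons p ps ih =>
    intro N hx hP hN
    have hp : key p = false := hP p (by simp)
    have := ih N hx (fun q hq => hP q (by simp [hq])) hN
    simp [PySem.List.insertBy, hx, hp, this]

-- a true-key element goes to the very end
theorem insertBy_last (key : List String → Bool) (x : List String) (l : List (List String))
    (hx : key x = true) :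
    PySem.List.insertBy (fun a b => decide (key a < key b)) x l = l ++ [x] := by
  apply PySem.List.insertBy_of_forall_not_before
  intro y _
  simp [hx]

-- invariant of the insertion-sort fold for a boolean key
theorem foldl_insertBy_partition (key : List String → Bool) :
    ∀ (xs P N : List (List String)),
      (∀ p ∈ P, key p = false) → (∀ n ∈ N, key n = true) →
      xs.foldl (fun acc x => PySem.List.insertBy (fun a b => decide (key a < key b)) x acc) (P ++ N)
        = (P ++ xs.filter (fun s => !key s)) ++ (N ++ xs.filter key) := by
  intro xs
  induction xs with
  | nil => intro P N _ _; simp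
  | cons x xs ih =>
    intro P N hP hN
    by_cases hx : key x = true
    · have h1 : PySem.List.insertBy (fun a b => decide (key a < key b)) x (P ++ N)
          = P ++ (N ++ [x]) := by
        rw [insertBy_last key x (P ++ N) hx, List.append_assoc]
      have h2 := ih P (N ++ [x]) hP (by
        intro n hn
        rcases List.mem_append.mp hn with h | h
        · exact hN n h
        · simp at h; subst h; exact hx)
      simp only [List.foldl, h1, h2, hx, List.filter_cons, Bool.not_true]
      simp
    · have hxf : key x = false := by simpa using hx
      have h1 := insertBy_boundary key x P N hxf hP hN
      have h2 := ih (P ++ [x]) N (by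
        intro p hp
        rcases List.mem_append.mp hp with h | h
        · exact hP p h
        · simp at h; subst h; exact hxf) hN
      have hPx : P ++ x :: N = (P ++ [x]) ++ N := by simp
      simp only [List.foldl, h1, hPx, h2, hxf, List.filter_cons, Bool.not_false]
      simp

-- the stable sort by a boolean key is exactly the partition
theorem sorted_bool_partition (key : List String → Bool) (xs : List (List String)) :
    PySem.List.sorted xs key false
      = xs.filter (fun s => !key s) ++ xs.filter key := by
  rw [PySem.List.sorted_eq_foldl_insertBy]
  simpa using foldl_insertBy_partition key xs [] []
    (by intro p hp; cases hp) (by intro n hn; cases hn)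

-- B's counting loop counts the positive rows
theorem foldl_count (c : List String → Bool) :
    ∀ (xs : List (List String)) (acc : Int),
      xs.foldl (fun (n : Int) s => n + (if c s then 1 else 0)) acc
        = acc + ((xs.filter c).length : Int) := by
  intro xs
  induction xs with
  | nil => intro acc; simp
  | cons x xs ih =>
    intro acc
    by_cases hx : c x
    · simp [List.foldl, hx, ih, List.filter_cons]; push_cast; ring
    · simp [List.foldl, hx, ih, List.filter_cons]

-- ===== VERDICT (by name: the statement is the Claim_ definition above) =====
theorem balance_samples_spec : Claim_equal_balance_samples := by
  intro samples _ _
  unfold Spec_balance_samples balance_samples balance_samples_alt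
  have key := partition_map (fun t => PySem.List.pyGetD samples t []) (PySem.List.enumerate samples 0)
      [] [] (enumerate_get samples)
  rw [PySem.List.map_snd_enumerate] at key
  obtain ⟨h1, h2⟩ := key
  simp only [List.map_nil, List.nil_append] at h1 h2
  set posF := samples.filter (fun s => !(PySem.List.pyGetD s 2 "" == "0")) with hposF
  set negF := samples.filter (fun s => PySem.List.pyGetD s 2 "" == "0") with hnegF
  have hlen : (((PySem.List.enumerate samples 0).foldl
      (fun (pn : List Int × List Int) is =>
        if PySem.List.pyGetD is.2 2 "" == "0" then (pn.1, pn.2 ++ [is.1]) else (pn.1 ++ [is.1], pn.2))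
      ([], [])).1).length = posF.length := by
    have := congrArg List.length h1
    simpa using this
  -- reduce A's side to posF ++ negF.take posF.length
  rw [foldl_gather_eq_map, List.nil_append, List.map_append, h1, PySem.List.slice_to_natCast,
    List.map_take, h2, hlen]
  -- reduce B's side
  simp only [foldl_count, sorted_bool_partition]
  rw [← hposF, ← hnegF]
  have hcast : (2 : Int) * ((0 : Int) + (posF.length : Int)) = ((2 * posF.length : Nat) : Int) := by
    push_cast; ring
  rw [hcast, PySem.List.slice_to_natCast, List.take_append,
    List.take_of_length_le (by omega : posF.length ≤ 2 * posF.length),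
    show 2 * posF.length - posF.length = posF.length by omega]
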